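-- pv_equiv track=rewrite | github.com/charlyjuarezalbarracin/Charly_Predictor | tests/test_regression_equilibrium.py | analizar_cercania
-- ===== SOURCE A (Python) =====
-- def analizar_cercania(prediccion, real):
--     """Analiza qué tan cerca están los números predichos del resultado real"""
--     aciertos_exactos = set(prediccion) & set(real)
--     casi_aciertos = set()
--
--     # Números a ±3 del resultado
--     for pred in prediccion:
--         for r in real:
--             if abs(pred - r) <= 3 and pred not in aciertos_exactos:
--                 casi_aciertos.add(pred)
--                 break
--
--     return len(aciertos_exactos), len(casi_aciertos)
-- ===== SOURCE B (Python) =====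
-- def analizar_cercania(prediccion, real):
--     """Analiza que tan cerca estan los numeros predichos del resultado real"""
--     real_set = set(real)
--     exactos = {p for p in prediccion if p in real_set}
--     casi = {p for p in prediccion
--             if p not in real_set and any(p + d in real_set for d in range(-3, 4))}
--     return len(exactos), len(casi)
-- ===== Notes on version B (the rewrite author's own statement) =====
-- stated objective: faster
-- what changed: A intersects sets and runs a nested loop over all of real for every prediction; B builds one hash set of real and classifies each prediction with at most 7 constant-time membership probes (p+d for d in -3..3), removing the inner scan entirely.
import Mathlib
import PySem

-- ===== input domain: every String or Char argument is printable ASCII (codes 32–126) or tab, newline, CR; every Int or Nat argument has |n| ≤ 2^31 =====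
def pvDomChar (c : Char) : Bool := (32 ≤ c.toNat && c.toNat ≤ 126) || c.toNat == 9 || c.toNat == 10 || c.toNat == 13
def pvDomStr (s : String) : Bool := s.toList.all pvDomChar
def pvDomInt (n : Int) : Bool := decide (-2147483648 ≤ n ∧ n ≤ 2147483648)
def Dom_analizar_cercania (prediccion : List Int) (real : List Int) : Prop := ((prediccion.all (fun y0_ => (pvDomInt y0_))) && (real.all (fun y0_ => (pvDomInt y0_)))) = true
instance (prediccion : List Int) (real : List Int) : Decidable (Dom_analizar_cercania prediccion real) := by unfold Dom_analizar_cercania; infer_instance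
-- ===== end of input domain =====

-- B replaces A's inner scan over `real` by at most 7 membership probes (p+d, |d| ≤ 3)
-- in a set built once from `real` (objective: faster).


-- ===== PORT A =====
-- inner 'for r in real: if abs(pred-r) <= 3 and pred not in aciertos_exactos: casi.add(pred); break'
def pvInnerA (p : Int) (rs : List Int) (ex : PySem.Set Int) (casi : PySem.Set Int) : PySem.Set Int :=
  match rs with
  | [] => casi
  | r :: t =>
    if |p - r| ≤ 3 ∧ ¬ (PySem.Set.contains ex p = true) then PySem.Set.add casi p
    else pvInnerA p t ex casi

def analizar_cercania (prediccion : List Int) (real : List Int) : Int × Int :=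
  let aciertos_exactos := PySem.Set.inter (PySem.Set.ofList prediccion) real
  let casi_aciertos := prediccion.foldl (fun casi pred => pvInnerA pred real aciertos_exactos casi) PySem.Set.empty
  (PySem.Set.len aciertos_exactos, PySem.Set.len casi_aciertos)

-- ===== PORT B =====
def analizar_cercania_alt (prediccion : List Int) (real : List Int) : Int × Int :=
  let realSet := PySem.Set.ofList real
  let exactos := prediccion.foldl
    (fun s p => if PySem.Set.contains realSet p then PySem.Set.add s p else s) PySem.Set.empty
  let casi := prediccion.foldl
    (fun s p =>
      if ¬ (PySem.Set.contains realSet p = true) ∧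
         ((PySem.List.pyRange (-3) 4 1).any fun d => PySem.Set.contains realSet (p + d)) = true
      then PySem.Set.add s p else s) PySem.Set.empty
  (PySem.Set.len exactos, PySem.Set.len casi)

-- ===== PRECONDITION & SPEC =====
def Spec_analizar_cercania (prediccion : List Int) (real : List Int) (out : Int × Int) : Prop := out = analizar_cercania_alt prediccion real
instance (prediccion : List Int) (real : List Int) (out : Int × Int) : Decidable (Spec_analizar_cercania prediccion real out) := by unfold Spec_analizar_cercania; infer_instance

-- ===== CLAIM (what is proved, stated in full; the proofs are below) =====
def Claim_equal_analizar_cercania : Prop := ∀ (prediccion : List Int) (real : List Int), Dom_analizar_cercania prediccion real → Spec_analizar_cercania prediccion real (analizar_cercania prediccion real)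

-- ===== LEMMAS AND PROOFS =====

theorem pv_len_eq_of_mem_iff (s t : PySem.Set Int) (hs : s.Nodup) (ht : t.Nodup)
    (h : ∀ x, x ∈ s ↔ x ∈ t) : PySem.Set.len s = PySem.Set.len t := by
  have : s.Perm t := (List.perm_ext_iff_of_nodup hs ht).2 h
  simp [PySem.Set.len, this.length_eq]

theorem pv_mem_foldl_add_if (c : Int → Prop) [DecidablePred c] (l : List Int)
    (s : PySem.Set Int) (y : Int) :
    (y ∈ l.foldl (fun s p => if c p then PySem.Set.add s p else s) s) ↔
      y ∈ s ∨ (y ∈ l ∧ c y) := by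
  induction l generalizing s with
  | nil => simp
  | cons hd tl ih =>
    simp only [List.foldl_cons, ih]
    by_cases hc : c hd
    · simp only [if_pos hc, PySem.Set.mem_add, List.mem_cons]
      constructor
      · rintro ((h | rfl) | h)
        · exact Or.inl h
        · exact Or.inr ⟨Or.inl rfl, hc⟩
        · exact Or.inr ⟨Or.inr h.1, h.2⟩
      · rintro (h | ⟨(rfl | h), hy⟩)
        · exact Or.inl (Or.inl h)
        · exact Or.inl (Or.inr rfl)
        · exact Or.inr ⟨h, hy⟩
    · simp only [if_neg hc, List.mem_cons]
      constructor
      · rintro (h | h)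
        · exact Or.inl h
        · exact Or.inr ⟨Or.inr h.1, h.2⟩
      · rintro (h | ⟨(rfl | h), hy⟩)
        · exact Or.inl h
        · exact absurd hy hc
        · exact Or.inr ⟨h, hy⟩

theorem pv_nodup_foldl_add_if (c : Int → Prop) [DecidablePred c] (l : List Int)
    (s : PySem.Set Int) (hs : s.Nodup) :
    (l.foldl (fun s p => if c p then PySem.Set.add s p else s) s).Nodup := by
  induction l generalizing s with
  | nil => exact hs
  | cons hd tl ih =>
    simp only [List.foldl_cons]
    split
    · exact ih _ (PySem.Set.nodup_add s hd hs)
    · exact ih _ hs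

theorem pv_mem_innerA (p : Int) (rs : List Int) (ex : PySem.Set Int) (casi : PySem.Set Int)
    (y : Int) :
    y ∈ pvInnerA p rs ex casi ↔
      y ∈ casi ∨ (y = p ∧ ¬ (PySem.Set.contains ex p = true) ∧ ∃ r ∈ rs, |p - r| ≤ 3) := by
  induction rs with
  | nil => simp [pvInnerA]
  | cons r t ih =>
    simp only [pvInnerA]
    by_cases h : |p - r| ≤ 3 ∧ ¬ (PySem.Set.contains ex p = true)
    · simp only [if_pos h, PySem.Set.mem_add]
      constructor
      · rintro (hy | rfl)
        · exact Or.inl hy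
        · exact Or.inr ⟨rfl, h.2, r, List.mem_cons_self .., h.1⟩
      · rintro (hy | ⟨rfl, _, _⟩)
        · exact Or.inl hy
        · exact Or.inr rfl
    · simp only [if_neg h, ih]
      constructor
      · rintro (hy | ⟨rfl, hex, r', hr', habs⟩)
        · exact Or.inl hy
        · exact Or.inr ⟨rfl, hex, r', List.mem_cons_of_mem _ hr', habs⟩
      · rintro (hy | ⟨rfl, hex, r', hr', habs⟩)
        · exact Or.inl hy
        · rcases List.mem_cons.1 hr' with rfl | hr'
          · exact absurd ⟨habs, hex⟩ h
          · exact Or.inr ⟨rfl, hex, r', hr', habs⟩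

theorem pv_nodup_innerA (p : Int) (rs : List Int) (ex : PySem.Set Int) (casi : PySem.Set Int)
    (h : casi.Nodup) : (pvInnerA p rs ex casi).Nodup := by
  induction rs with
  | nil => exact h
  | cons r t ih =>
    simp only [pvInnerA]
    split
    · exact PySem.Set.nodup_add casi p h
    · exact ih

theorem pv_mem_foldl_innerA (l rs : List Int) (ex : PySem.Set Int) (s : PySem.Set Int) (y : Int) :
    (y ∈ l.foldl (fun casi pred => pvInnerA pred rs ex casi) s) ↔
      y ∈ s ∨ (y ∈ l ∧ ¬ (PySem.Set.contains ex y = true) ∧ ∃ r ∈ rs, |y - r| ≤ 3) := by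
  induction l generalizing s with
  | nil => simp
  | cons hd tl ih =>
    simp only [List.foldl_cons, ih, pv_mem_innerA, List.mem_cons]
    constructor
    · rintro ((hy | ⟨rfl, hx⟩) | ⟨hy, hx⟩)
      · exact Or.inl hy
      · exact Or.inr ⟨Or.inl rfl, hx⟩
      · exact Or.inr ⟨Or.inr hy, hx⟩
    · rintro (hy | ⟨(rfl | hy), hx⟩)
      · exact Or.inl (Or.inl hy)
      · exact Or.inl (Or.inr ⟨rfl, hx⟩)
      · exact Or.inr ⟨hy, hx⟩

theorem pv_nodup_foldl_innerA (l rs : List Int) (ex : PySem.Set Int) (s : PySem.Set Int)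
    (hs : s.Nodup) : (l.foldl (fun casi pred => pvInnerA pred rs ex casi) s).Nodup := by
  induction l generalizing s with
  | nil => exact hs
  | cons hd tl ih => exact ih _ (pv_nodup_innerA _ _ _ _ hs)

theorem pv_window_iff (realSet : PySem.Set Int) (real : List Int)
    (hset : ∀ x, PySem.Set.contains realSet x = true ↔ x ∈ real) (p : Int) :
    (((PySem.List.pyRange (-3) 4 1).any fun d => PySem.Set.contains realSet (p + d)) = true) ↔
      ∃ r ∈ real, |p - r| ≤ 3 := by
  simp only [List.any_eq_true, PySem.List.mem_pyRange_one]
  constructor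
  · rintro ⟨d, ⟨h1, h2⟩, hc⟩
    exact ⟨p + d, (hset _).1 hc, by rw [abs_le]; omega⟩
  · rintro ⟨r, hr, habs⟩
    rw [abs_le] at habs
    exact ⟨r - p, ⟨by omega, by omega⟩, by rw [show p + (r - p) = r by ring]; exact (hset _).2 hr⟩

-- ===== VERDICT (by name: the statement is the Claim_ definition above) =====
theorem analizar_cercania_spec : Claim_equal_analizar_cercania := by
  intro prediccion real _
  unfold Spec_analizar_cercania analizar_cercania analizar_cercania_alt
  have hset : ∀ x, PySem.Set.contains (PySem.Set.ofList real) x = true ↔ x ∈ real := by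
    intro x
    rw [PySem.Set.contains_iff, PySem.Set.mem_ofList]
  have hex : ∀ x, PySem.Set.contains
      (PySem.Set.inter (PySem.Set.ofList prediccion) real) x = true ↔
      x ∈ prediccion ∧ x ∈ real := by
    intro x
    rw [PySem.Set.contains_iff, PySem.Set.mem_inter, PySem.Set.mem_ofList]
  refine Prod.ext ?_ ?_
  · -- exact-match counts
    apply pv_len_eq_of_mem_iff
    · exact PySem.Set.nodup_inter _ _ (PySem.Set.nodup_ofList _)
    · exact pv_nodup_foldl_add_if _ _ _ (List.nodup_nil)
    · intro x
      rw [PySem.Set.mem_inter, PySem.Set.mem_ofList, pv_mem_foldl_add_if]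
      simp only [PySem.Set.empty, List.not_mem_nil, false_or, hset]
  · -- near-match counts
    apply pv_len_eq_of_mem_iff
    · exact pv_nodup_foldl_innerA _ _ _ _ List.nodup_nil
    · exact pv_nodup_foldl_add_if _ _ _ List.nodup_nil
    · intro x
      rw [pv_mem_foldl_innerA, pv_mem_foldl_add_if]
      simp only [PySem.Set.empty, List.not_mem_nil, false_or, hex, pv_window_iff _ _ hset, hset]
      tauto
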